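-- pv_equiv track=rewrite | github.com/jolitti/adventofcode | 2023/day7.py | lex_greater
-- ===== SOURCE A (Python) =====
-- card_power = {c:i for i,c in enumerate("23456789TJQKA")}
--
-- card_power2 = {c:i for i,c in enumerate("J23456789TQKA")}
--
-- def lex_greater(hand1,hand2,part=1) -> bool:
--     if len(hand1) != len(hand2):
--         raise ValueError()
--     if hand1 == hand2 == "":
--         raise ValueError("Hands shouldn't be equal")
--     if hand1[0] == hand2[0]:
--         return lex_greater(hand1[1:],hand2[1:],part)
--
--     if part == 1:
--         return card_power[hand1[0]] > card_power[hand2[0]]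
--     else:
--         return card_power2[hand1[0]] > card_power2[hand2[0]]
-- ===== SOURCE B (Python) =====
-- card_power = {c:i for i,c in enumerate("23456789TJQKA")}
--
-- card_power2 = {c:i for i,c in enumerate("J23456789TQKA")}
--
-- def lex_greater(hand1, hand2, part=1) -> bool:
--     if len(hand1) != len(hand2):
--         raise ValueError()
--     pw = card_power if part == 1 else card_power2
--     for a, b in zip(hand1, hand2):
--         if a != b:
--             return pw[a] > pw[b]
--     raise ValueError("Hands shouldn't be equal")
-- ===== Notes on version B (the rewrite author's own statement) =====
-- stated objective: simpler
-- what changed: Replaced the recursive string-slicing descent with a single zip loop that scans to the first differing position and compares its card powers there, maintaining only the loop position instead of progressively sliced substrings.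
import Mathlib
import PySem

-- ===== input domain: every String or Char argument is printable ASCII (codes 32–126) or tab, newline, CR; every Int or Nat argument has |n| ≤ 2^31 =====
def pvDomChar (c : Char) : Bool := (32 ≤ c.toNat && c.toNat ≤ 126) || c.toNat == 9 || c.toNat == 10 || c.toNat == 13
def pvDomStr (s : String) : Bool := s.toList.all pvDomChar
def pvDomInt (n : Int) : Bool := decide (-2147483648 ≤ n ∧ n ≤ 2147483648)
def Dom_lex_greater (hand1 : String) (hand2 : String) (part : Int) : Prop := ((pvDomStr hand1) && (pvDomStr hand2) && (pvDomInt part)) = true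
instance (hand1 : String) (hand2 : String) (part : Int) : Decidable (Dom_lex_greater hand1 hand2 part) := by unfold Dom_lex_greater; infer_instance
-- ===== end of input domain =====

-- B replaces A's recursive string-slicing descent with a single zip loop that finds the
-- first differing position (objective: simpler). Return-value equivalence on Pre_.

-- ===== PORT A =====
-- card_power[c] : position of c in "23456789TJQKA"; getD 0 is unreachable under Pre_
-- (Python raises KeyError exactly where index? is none, and Pre_ excludes those inputs).
def cardPower (c : Char) : Nat := (PySem.List.index? "23456789TJQKA".toList c).getD 0
def cardPower2 (c : Char) : Nat := (PySem.List.index? "J23456789TQKA".toList c).getD 0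

-- literal recursion of A over the two character lists (hand[1:] = the tail);
-- the `false` branches are A's raise paths, excluded by Pre_.
def lexGreaterAux : List Char → List Char → Int → Bool
  | c1 :: t1, c2 :: t2, part =>
      if t1.length ≠ t2.length then false  -- len(hand1) != len(hand2): raise
      else if c1 = c2 then lexGreaterAux t1 t2 part
      else if part = 1 then decide (cardPower c1 > cardPower c2)
      else decide (cardPower2 c1 > cardPower2 c2)
  | _, _, _ => false  -- lengths differ or both empty: raise

def lex_greater (hand1 : String) (hand2 : String) (part : Int) : Bool :=
  if hand1.toList.length ≠ hand2.toList.length then false  -- raise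
  else lexGreaterAux hand1.toList hand2.toList part

-- ===== PORT B =====
def lex_greater_alt (hand1 : String) (hand2 : String) (part : Int) : Bool :=
  if hand1.toList.length ≠ hand2.toList.length then false  -- raise
  else
    let pw : Char → Nat := if part = 1 then cardPower else cardPower2
    match (hand1.toList.zip hand2.toList).find? (fun p => p.1 ≠ p.2) with
    | some (a, b) => decide (pw a > pw b)
    | none => false  -- equal hands: raise

-- ===== PRECONDITION & SPEC =====
-- Pre_ excludes exactly the inputs where the Python A raises: unequal lengths and equal
-- hands (ValueError), and a first differing position whose chars are not both cards (KeyError).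
-- a char is a card key of card_power/card_power2 (digit 2..9 or one of T J Q K A)
def isCardB (c : Char) : Bool := ('2' ≤ c && c ≤ '9') || c == 'T' || c == 'J' || c == 'Q' || c == 'K' || c == 'A'

def Pre_lex_greater (hand1 : String) (hand2 : String) (part : Int) : Prop :=
  hand1.toList.length = hand2.toList.length ∧ hand1.toList ≠ hand2.toList ∧
  ((hand1.toList.zip hand2.toList).find? (fun p => p.1 ≠ p.2)).all
    (fun p => isCardB p.1 && isCardB p.2) = true
instance (hand1 : String) (hand2 : String) (part : Int) : Decidable (Pre_lex_greater hand1 hand2 part) := by unfold Pre_lex_greater; infer_instance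

def pvWitness_lex_greater : String × String × Int := ("2", "3", 1)

def Spec_lex_greater (hand1 : String) (hand2 : String) (part : Int) (out : Bool) : Prop := out = lex_greater_alt hand1 hand2 part
instance (hand1 : String) (hand2 : String) (part : Int) (out : Bool) : Decidable (Spec_lex_greater hand1 hand2 part out) := by unfold Spec_lex_greater; infer_instance

-- ===== CLAIM (what is proved, stated in full; the proofs are below) =====
def Claim_equal_lex_greater : Prop := ∀ (hand1 : String) (hand2 : String) (part : Int), Dom_lex_greater hand1 hand2 part → Pre_lex_greater hand1 hand2 part → Spec_lex_greater hand1 hand2 part (lex_greater hand1 hand2 part)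

-- ===== LEMMAS AND PROOFS =====
theorem lexGreaterAux_eq_find (l1 l2 : List Char) (part : Int)
    (hlen : l1.length = l2.length) (hne : l1 ≠ l2) :
    lexGreaterAux l1 l2 part =
      match (l1.zip l2).find? (fun p => p.1 ≠ p.2) with
      | some (a, b) =>
          if part = 1 then decide (cardPower a > cardPower b)
          else decide (cardPower2 a > cardPower2 b)
      | none => false := by
  induction l1 generalizing l2 with
  | nil =>
    cases l2 with
    | nil => exact absurd rfl hne
    | cons c2 t2 => simp at hlen
  | cons c1 t1 ih =>
    cases l2 with
    | nil => simp at hlen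
    | cons c2 t2 =>
      simp only [List.length_cons, Nat.add_right_cancel_iff] at hlen
      by_cases hc : c1 = c2
      · subst hc
        have hne' : t1 ≠ t2 := by intro h; exact hne (by rw [h])
        simp only [lexGreaterAux, hlen, ne_eq, not_true_eq_false, if_false,
          List.zip_cons_cons, List.find?_cons, decide_not]
        rw [ih t2 hlen hne']
        simp
      · simp only [lexGreaterAux, hlen, ne_eq, not_true_eq_false, if_false, if_neg hc,
          List.zip_cons_cons, List.find?_cons]
        simp [hc]

theorem lex_greater_spec' (hand1 hand2 : String) (part : Int)
    (hp : Pre_lex_greater hand1 hand2 part) :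
    lex_greater hand1 hand2 part = lex_greater_alt hand1 hand2 part := by
  obtain ⟨hlen, hne, -⟩ := hp
  unfold lex_greater lex_greater_alt
  simp only [hlen, ne_eq, not_true_eq_false, if_false]
  rw [lexGreaterAux_eq_find _ _ _ hlen hne]
  by_cases hpart : part = 1 <;> simp [hpart]

-- ===== VERDICT (by name: the statement is the Claim_ definition above) =====
theorem lex_greater_spec : Claim_equal_lex_greater := by
  intro hand1 hand2 part _ hp
  exact lex_greater_spec' hand1 hand2 part hp
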